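-- pv_equiv track=rewrite | github.com/Warmcloud1/python | PY/15x15 Nonogram Solver.py | dict1_key
-- ===== SOURCE A (Python) =====
-- row=15
--
-- def dict1_key(clues,dict1_values,dict1_keys_all):
--         dict1={}
--         dict1_keys=tuple(set(dict1_keys_all))
--         for side in clues:
--                 for clue in side:
--                     if clue in dict1:
--                             continue
--                     for rr,jj in enumerate(dict1_keys_all):
--                             if clue==jj:
--                                     if clue in dict1:
--                                             dict1[clue]+=(dict1_values[rr]),
--                                     else:
--                                             dict1[clue]=(dict1_values[rr]),
--         dict1[()]=(0,)*row,
--         return dict1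
-- ===== SOURCE B (Python) =====
-- row = 15
--
-- def dict1_key(clues, dict1_values, dict1_keys_all):
--     # Single pass: group values by key once, then one lookup per clue.
--     groups = {}
--     for k, v in zip(dict1_keys_all, dict1_values):
--         groups.setdefault(k, []).append(v)
--     dict1 = {}
--     for side in clues:
--         for clue in side:
--             if clue not in dict1 and clue in groups:
--                 dict1[clue] = tuple(groups[clue])
--     dict1[()] = ((0,) * row,)
--     return dict1
-- ===== Notes on version B (the rewrite author's own statement) =====
-- stated objective: faster
-- what changed: B builds a key->values grouping dict in one pass over zip(dict1_keys_all, dict1_values) and does a single lookup per clue, instead of A's full rescan of dict1_keys_all for every not-yet-seen clue.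
import Mathlib
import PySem

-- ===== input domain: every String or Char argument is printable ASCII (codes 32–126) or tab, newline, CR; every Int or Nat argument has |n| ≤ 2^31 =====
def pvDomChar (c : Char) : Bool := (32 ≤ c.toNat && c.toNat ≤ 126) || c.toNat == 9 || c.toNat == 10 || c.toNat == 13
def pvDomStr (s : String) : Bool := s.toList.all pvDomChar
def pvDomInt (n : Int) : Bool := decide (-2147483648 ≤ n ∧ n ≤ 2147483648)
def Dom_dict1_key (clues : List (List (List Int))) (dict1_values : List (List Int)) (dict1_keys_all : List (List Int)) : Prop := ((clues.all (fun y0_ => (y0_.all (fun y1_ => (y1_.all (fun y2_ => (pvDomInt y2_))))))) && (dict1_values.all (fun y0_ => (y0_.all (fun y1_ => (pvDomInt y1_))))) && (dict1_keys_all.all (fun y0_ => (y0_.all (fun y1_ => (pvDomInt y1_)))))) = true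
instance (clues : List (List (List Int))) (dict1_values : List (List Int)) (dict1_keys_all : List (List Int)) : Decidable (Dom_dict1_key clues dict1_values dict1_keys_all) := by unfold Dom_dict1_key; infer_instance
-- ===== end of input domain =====

-- B replaces A's per-clue rescan of dict1_keys_all by one grouping pass plus one lookup per clue;
-- the returned dict (as an insertion-ordered association list) is proved equal on Pre_ below.

-- ===== PORT A =====
-- literal transliteration of A; `dict1_values[rr]` is ported as pyGetD … [] — Python raises
-- IndexError exactly where that index is out of range, and Pre_dict1_key excludes those inputs.
def dict1_key (clues : List (List (List Int))) (dict1_values : List (List Int)) (dict1_keys_all : List (List Int)) : List (List Int × List (List Int)) :=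
  let dict1 : PySem.Dict (List Int) (List (List Int)) := PySem.Dict.empty
  let _dict1_keys := PySem.Set.ofList dict1_keys_all  -- dict1_keys = tuple(set(...)): dead code in A too (never read)
  let dict1 := clues.foldl (fun dict1 side =>
    side.foldl (fun dict1 clue =>
      if dict1.contains clue then dict1  -- if clue in dict1: continue
      else (PySem.List.enumerate dict1_keys_all).foldl (fun dict1 p =>
        if clue == p.2 then
          if dict1.contains clue then
            dict1.insert clue (dict1.getD clue [] ++ [PySem.List.pyGetD dict1_values p.1 []])
          else dict1.insert clue [PySem.List.pyGetD dict1_values p.1 []]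
        else dict1) dict1) dict1) dict1
  (dict1.insert [] [List.replicate 15 0]).items  -- dict1[()] = ((0,)*row,) with row = 15

-- ===== PORT B =====
def dict1_key_alt (clues : List (List (List Int))) (dict1_values : List (List Int)) (dict1_keys_all : List (List Int)) : List (List Int × List (List Int)) :=
  -- groups.setdefault(k, []).append(v)  ==  groups[k] = groups.get(k, []) + [v]  ==  Dict.modify
  let groups : PySem.Dict (List Int) (List (List Int)) :=
    (dict1_keys_all.zip dict1_values).foldl (fun g p => g.modify p.1 [] (· ++ [p.2])) PySem.Dict.empty
  let dict1 := clues.foldl (fun d side =>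
    side.foldl (fun d clue =>
      if !d.contains clue && groups.contains clue then d.insert clue (groups.getD clue []) else d) d)
    (PySem.Dict.empty : PySem.Dict (List Int) (List (List Int)))
  (dict1.insert [] [List.replicate 15 0]).items  -- dict1[()] = ((0,)*row,) with row = 15

-- ===== PRECONDITION & SPEC =====
-- Pre_ excludes exactly the inputs on which A raises IndexError: some clue occurring in
-- dict1_keys_all at an index ≥ len(dict1_values), i.e. in dict1_keys_all[len(dict1_values):].
def Pre_dict1_key (clues : List (List (List Int))) (dict1_values : List (List Int)) (dict1_keys_all : List (List Int)) : Prop :=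
  ∀ side ∈ clues, ∀ clue ∈ side, clue ∉ dict1_keys_all.drop dict1_values.length
instance (clues : List (List (List Int))) (dict1_values : List (List Int)) (dict1_keys_all : List (List Int)) : Decidable (Pre_dict1_key clues dict1_values dict1_keys_all) := by unfold Pre_dict1_key; infer_instance

def pvWitness_dict1_key : List (List (List Int)) × List (List Int) × List (List Int) :=
  ([[[1], [2]], [[1]]], [[10], [20]], [[1], [1]])

def Spec_dict1_key (clues : List (List (List Int))) (dict1_values : List (List Int)) (dict1_keys_all : List (List Int)) (out : List (List Int × List (List Int))) : Prop := out = dict1_key_alt clues dict1_values dict1_keys_all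
instance (clues : List (List (List Int))) (dict1_values : List (List Int)) (dict1_keys_all : List (List Int)) (out : List (List Int × List (List Int))) : Decidable (Spec_dict1_key clues dict1_values dict1_keys_all out) := by unfold Spec_dict1_key; infer_instance

-- ===== CLAIM (what is proved, stated in full; the proofs are below) =====
def Claim_equal_dict1_key : Prop := ∀ (clues : List (List (List Int))) (dict1_values : List (List Int)) (dict1_keys_all : List (List Int)), Dom_dict1_key clues dict1_values dict1_keys_all → Pre_dict1_key clues dict1_values dict1_keys_all → Spec_dict1_key clues dict1_values dict1_keys_all (dict1_key clues dict1_values dict1_keys_all)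
-- ===== LEMMAS AND PROOFS =====

-- A's inner scan over enumerate(dict1_keys_all), as a function of the current dict
def pvInnerA (clue : List Int) (dict1_values : List (List Int))
    (d : PySem.Dict (List Int) (List (List Int))) (l : List (Int × List Int)) :
    PySem.Dict (List Int) (List (List Int)) :=
  l.foldl (fun dict1 p =>
    if clue == p.2 then
      if dict1.contains clue then
        dict1.insert clue (dict1.getD clue [] ++ [PySem.List.pyGetD dict1_values p.1 []])
      else dict1.insert clue [PySem.List.pyGetD dict1_values p.1 []]
    else dict1) d

-- the values A collects for `clue` while scanning l
def pvValsA (clue : List Int) (dict1_values : List (List Int)) (l : List (Int × List Int)) : List (List Int) :=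
  (l.filter (fun p => clue == p.2)).map (fun p => PySem.List.pyGetD dict1_values p.1 [])

theorem pv_insert_get?_self {κ ν : Type} [BEq κ] [LawfulBEq κ] (d : PySem.Dict κ ν) (k : κ) (v : ν)
    (hnd : d.keys.Nodup) (h : d.get? k = some v) : d.insert k v = d := by
  apply PySem.Dict.ext
  have hc : d.contains k = true := by rw [PySem.Dict.contains_eq_isSome_get?, h]; rfl
  rw [PySem.Dict.items_insert_of_contains _ _ hc]
  conv_rhs => rw [← List.map_id d.items]
  apply List.map_congr_left
  intro p hp
  by_cases hk : p.1 = k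
  · have hm : (k, p.2) ∈ d.items := by rw [← hk]; simpa using hp
    have hv : p.2 = v := by
      have := PySem.Dict.get?_of_mem_items d hm hnd
      rw [h] at this
      exact ((Option.some.injEq _ _).mp this).symm
    have : p = (k, v) := Prod.ext hk hv
    simp [this]
  · simp [hk]

theorem pvInnerA_cons (clue : List Int) (dict1_values : List (List Int)) (p : Int × List Int)
    (l : List (Int × List Int)) (d : PySem.Dict (List Int) (List (List Int))) :
    pvInnerA clue dict1_values d (p :: l) =
      pvInnerA clue dict1_values
        (if clue == p.2 then
          if d.contains clue then d.insert clue (d.getD clue [] ++ [PySem.List.pyGetD dict1_values p.1 []])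
          else d.insert clue [PySem.List.pyGetD dict1_values p.1 []]
        else d) l := rfl

theorem pvInnerA_of_mem (clue : List Int) (dict1_values : List (List Int))
    (l : List (Int × List Int)) : ∀ (d : PySem.Dict (List Int) (List (List Int))) (acc : List (List Int)),
    d.keys.Nodup → d.get? clue = some acc →
    pvInnerA clue dict1_values d l = d.insert clue (acc ++ pvValsA clue dict1_values l) := by
  induction l with
  | nil =>
    intro d acc hnd h
    simp [pvInnerA, pvValsA]
    exact (pv_insert_get?_self d clue acc hnd h).symm
  | cons p l ih =>
    intro d acc hnd h
    have hc : d.contains clue = true := by rw [PySem.Dict.contains_eq_isSome_get?, h]; rfl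
    rw [pvInnerA_cons]
    by_cases hp : (clue == p.2) = true
    · rw [if_pos hp, if_pos hc]
      have hgd : d.getD clue [] = acc := by
        rw [PySem.Dict.getD_eq_get?_getD, h]; rfl
      rw [hgd]
      rw [ih _ (acc ++ [PySem.List.pyGetD dict1_values p.1 []])
            (PySem.Dict.nodup_keys_insert _ _ _ hnd) (PySem.Dict.get?_insert_self _ _ _)]
      rw [PySem.Dict.insert_insert_self]
      have : pvValsA clue dict1_values (p :: l) =
          PySem.List.pyGetD dict1_values p.1 [] :: pvValsA clue dict1_values l := by
        simp [pvValsA, hp]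
      rw [this, List.append_assoc]
      rfl
    · rw [if_neg hp, ih d acc hnd h]
      have : pvValsA clue dict1_values (p :: l) = pvValsA clue dict1_values l := by
        simp [pvValsA, hp]
      rw [this]

theorem pvInnerA_of_not_mem (clue : List Int) (dict1_values : List (List Int))
    (l : List (Int × List Int)) : ∀ (d : PySem.Dict (List Int) (List (List Int))),
    d.keys.Nodup → d.contains clue = false →
    pvInnerA clue dict1_values d l =
      if pvValsA clue dict1_values l = [] then d else d.insert clue (pvValsA clue dict1_values l) := by
  induction l with
  | nil => intro d hnd h; simp [pvInnerA, pvValsA]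
  | cons p l ih =>
    intro d hnd h
    rw [pvInnerA_cons]
    by_cases hp : (clue == p.2) = true
    · rw [if_pos hp, if_neg (by simp [h])]
      rw [pvInnerA_of_mem clue dict1_values l _ [PySem.List.pyGetD dict1_values p.1 []]
            (PySem.Dict.nodup_keys_insert _ _ _ hnd) (PySem.Dict.get?_insert_self _ _ _)]
      rw [PySem.Dict.insert_insert_self]
      have hv : pvValsA clue dict1_values (p :: l) =
          PySem.List.pyGetD dict1_values p.1 [] :: pvValsA clue dict1_values l := by
        simp [pvValsA, hp]
      rw [hv, if_neg (by simp)]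
      rfl
    · rw [if_neg hp, ih d hnd h]
      have : pvValsA clue dict1_values (p :: l) = pvValsA clue dict1_values l := by
        simp [pvValsA, hp]
      rw [this]

theorem pvValsA_of_not_mem (clue : List Int) (dict1_values : List (List Int)) :
    ∀ (ks : List (List Int)) (n : Int), clue ∉ ks →
    pvValsA clue dict1_values (PySem.List.enumerate ks n) = [] := by
  intro ks
  induction ks with
  | nil => intro n _; simp [pvValsA, PySem.List.enumerate]
  | cons k ks ih =>
    intro n h
    have hk : ¬ (clue == k) = true := by simp_all
    have : pvValsA clue dict1_values (PySem.List.enumerate (k :: ks) n) =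
        pvValsA clue dict1_values (PySem.List.enumerate ks (n + 1)) := by
      simp [pvValsA, PySem.List.enumerate, hk]
    rw [this, ih (n + 1) (fun hc => h (List.mem_cons_of_mem _ hc))]

-- under the per-clue precondition, A's collected values are exactly the grouped zip values
theorem pvValsA_eq_zip (clue : List Int) (dict1_values : List (List Int)) :
    ∀ (ks vs : List (List Int)) (n : Nat), vs = dict1_values.drop n →
    clue ∉ ks.drop vs.length →
    pvValsA clue dict1_values (PySem.List.enumerate ks (n : Int)) =
      ((ks.zip vs).filter (fun p => p.1 == clue)).map (fun p => p.2) := by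
  intro ks
  induction ks with
  | nil => intro vs n _ _; simp [pvValsA, PySem.List.enumerate]
  | cons k ks ih =>
    intro vs n hvs hnd
    match vs with
    | [] =>
      simp only [List.length_nil, List.drop_zero] at hnd
      rw [pvValsA_of_not_mem clue dict1_values _ _ hnd]
      simp
    | v :: vs' =>
      have hv : dict1_values[n]? = some v := by
        have := congrArg (fun l => l[0]?) hvs
        simpa [List.getElem?_drop] using this.symm
      have hvs' : vs' = dict1_values.drop (n + 1) := by
        have := congrArg List.tail hvs
        simpa [List.tail_drop] using this
      have hnd' : clue ∉ ks.drop vs'.length := by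
        simpa using hnd
      have hget : PySem.List.pyGetD dict1_values (n : Int) [] = v := by
        rw [PySem.List.pyGetD_natCast]
        simp [List.getD_eq_getElem?_getD, hv]
      have hrec := ih vs' (n + 1) hvs' hnd'
      by_cases hk : (clue == k) = true
      · have hk' : clue = k := by simpa using hk
        have hk2 : (k == clue) = true := by simp [hk'.symm]
        simp only [pvValsA, PySem.List.enumerate, List.zip_cons_cons, List.filter_cons, hk, hk2,
          if_true, List.map_cons]
        simp only [pvValsA] at hrec
        have hcast : (n : Int) + 1 = ((n + 1 : Nat) : Int) := by push_cast; ring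
        rw [← hcast] at hrec
        rw [hrec, hget]
      · have hk0 : (clue == k) = false := by simpa using hk
        have hk2 : (k == clue) = false := by
          simp only [beq_eq_false_iff_ne] at hk0 ⊢
          exact fun h => hk0 h.symm
        simp only [pvValsA, PySem.List.enumerate, List.zip_cons_cons, List.filter_cons, hk0, hk2,
          Bool.false_eq_true, if_false]
        simp only [pvValsA] at hrec
        have hcast : (n : Int) + 1 = ((n + 1 : Nat) : Int) := by push_cast; ring
        rw [← hcast] at hrec
        exact hrec

theorem pv_groups_getD (clue : List Int) (dict1_values dict1_keys_all : List (List Int)) :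
    ((dict1_keys_all.zip dict1_values).foldl (fun g p => g.modify p.1 [] (· ++ [p.2])) PySem.Dict.empty).getD clue [] =
      (((dict1_keys_all.zip dict1_values)).filter (fun p => p.1 == clue)).map (fun p => p.2) := by
  rw [PySem.Dict.getD_foldl_modify_append]
  simp

theorem pv_groups_contains (clue : List Int) (dict1_values dict1_keys_all : List (List Int)) :
    ((dict1_keys_all.zip dict1_values).foldl (fun g p => g.modify p.1 [] (· ++ [p.2])) PySem.Dict.empty).contains clue = true ↔
      clue ∈ (dict1_keys_all.zip dict1_values).map (fun p => p.1) := by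
  rw [PySem.Dict.contains_iff_mem_keys]
  rw [PySem.Dict.keys_foldl_modify_key (dict1_keys_all.zip dict1_values) (fun p => p.1) []
        (fun _ p => (· ++ [p.2])) PySem.Dict.empty]
  rw [PySem.Dict.keys_empty, PySem.Set.update_nil_left]
  simp [PySem.Set.mem_ofList]

-- one clue step of A equals one clue step of B (for a dict with distinct keys, on an admitted clue)
theorem pv_step_eq (clue : List Int) (dict1_values dict1_keys_all : List (List Int))
    (d : PySem.Dict (List Int) (List (List Int))) (hnd : d.keys.Nodup)
    (hpre : clue ∉ dict1_keys_all.drop dict1_values.length) :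
    (if d.contains clue then d else pvInnerA clue dict1_values d (PySem.List.enumerate dict1_keys_all)) =
    (let groups := (dict1_keys_all.zip dict1_values).foldl (fun g p => g.modify p.1 [] (· ++ [p.2])) PySem.Dict.empty
     if !d.contains clue && groups.contains clue then d.insert clue (groups.getD clue []) else d) := by
  by_cases hc : d.contains clue = true
  · simp [hc]
  · have hc' : d.contains clue = false := by simpa using hc
    simp only [hc', if_false, Bool.not_false, Bool.true_and, Bool.false_eq_true]
    have he0 : PySem.List.enumerate dict1_keys_all = PySem.List.enumerate dict1_keys_all ((0 : Nat) : Int) := by norm_num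
    have hvals := pvValsA_eq_zip clue dict1_values dict1_keys_all dict1_values 0 (by simp)
      (by simpa using hpre)
    rw [pvInnerA_of_not_mem clue dict1_values _ d hnd hc', he0, hvals]
    by_cases hg : ((dict1_keys_all.zip dict1_values).foldl (fun g p => g.modify p.1 [] (· ++ [p.2])) PySem.Dict.empty).contains clue = true
    · rw [if_pos hg, pv_groups_getD]
      rw [pv_groups_contains] at hg
      rw [if_neg]
      intro hemp
      rcases List.mem_map.mp hg with ⟨p, hp, hp1⟩
      have : p ∈ (dict1_keys_all.zip dict1_values).filter (fun p => p.1 == clue) := by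
        rw [List.mem_filter]
        exact ⟨hp, by simp [hp1]⟩
      rw [List.map_eq_nil_iff.mp hemp] at this
      simp at this
    · have hg' : ((dict1_keys_all.zip dict1_values).foldl (fun g p => g.modify p.1 [] (· ++ [p.2])) PySem.Dict.empty).contains clue = false := by simpa using hg
      rw [pv_groups_contains] at hg
      have hemp : List.map (fun p => p.2) (List.filter (fun p => p.1 == clue) (dict1_keys_all.zip dict1_values)) = [] := by
        rw [List.map_eq_nil_iff, List.filter_eq_nil_iff]
        intro p hp hbeq
        exact hg (List.mem_map.mpr ⟨p, hp, by simpa using hbeq⟩)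
      rw [if_pos hemp, hg']
      simp

theorem pv_sideB_nodup (dict1_values dict1_keys_all : List (List Int)) :
    ∀ (side : List (List Int)) (d : PySem.Dict (List Int) (List (List Int))), d.keys.Nodup →
    ((side.foldl (fun d clue =>
      if !d.contains clue && ((dict1_keys_all.zip dict1_values).foldl (fun g p => g.modify p.1 [] (· ++ [p.2])) PySem.Dict.empty).contains clue then
        d.insert clue (((dict1_keys_all.zip dict1_values).foldl (fun g p => g.modify p.1 [] (· ++ [p.2])) PySem.Dict.empty).getD clue []) else d) d).keys).Nodup := by
  intro side
  induction side with
  | nil => intro d hnd; simpa using hnd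
  | cons clue side ih =>
    intro d hnd
    rw [List.foldl_cons]
    apply ih
    split
    · exact PySem.Dict.nodup_keys_insert _ _ _ hnd
    · exact hnd

theorem pv_side_eq (dict1_values dict1_keys_all : List (List Int)) :
    ∀ (side : List (List Int)) (d : PySem.Dict (List Int) (List (List Int))), d.keys.Nodup →
    (∀ clue ∈ side, clue ∉ dict1_keys_all.drop dict1_values.length) →
    side.foldl (fun dict1 clue =>
      if dict1.contains clue then dict1
      else (PySem.List.enumerate dict1_keys_all).foldl (fun dict1 p =>
        if clue == p.2 then
          if dict1.contains clue then
            dict1.insert clue (dict1.getD clue [] ++ [PySem.List.pyGetD dict1_values p.1 []])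
          else dict1.insert clue [PySem.List.pyGetD dict1_values p.1 []]
        else dict1) dict1) d =
    side.foldl (fun d clue =>
      if !d.contains clue && ((dict1_keys_all.zip dict1_values).foldl (fun g p => g.modify p.1 [] (· ++ [p.2])) PySem.Dict.empty).contains clue then
        d.insert clue (((dict1_keys_all.zip dict1_values).foldl (fun g p => g.modify p.1 [] (· ++ [p.2])) PySem.Dict.empty).getD clue []) else d) d := by
  intro side
  induction side with
  | nil => intro d _ _; rfl
  | cons clue side ih =>
    intro d hnd hpre
    rw [List.foldl_cons, List.foldl_cons]
    have hstep := pv_step_eq clue dict1_values dict1_keys_all d hnd (hpre clue (List.mem_cons_self))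
    rw [show (if d.contains clue then d
        else (PySem.List.enumerate dict1_keys_all).foldl (fun dict1 p =>
          if clue == p.2 then
            if dict1.contains clue then
              dict1.insert clue (dict1.getD clue [] ++ [PySem.List.pyGetD dict1_values p.1 []])
            else dict1.insert clue [PySem.List.pyGetD dict1_values p.1 []]
          else dict1) d) =
      (if !d.contains clue && ((dict1_keys_all.zip dict1_values).foldl (fun g p => g.modify p.1 [] (· ++ [p.2])) PySem.Dict.empty).contains clue then
        d.insert clue (((dict1_keys_all.zip dict1_values).foldl (fun g p => g.modify p.1 [] (· ++ [p.2])) PySem.Dict.empty).getD clue []) else d) from hstep]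
    apply ih
    · split
      · exact PySem.Dict.nodup_keys_insert _ _ _ hnd
      · exact hnd
    · exact fun c hc => hpre c (List.mem_cons_of_mem _ hc)

theorem pv_clues_eq (dict1_values dict1_keys_all : List (List Int)) :
    ∀ (clues : List (List (List Int))) (d : PySem.Dict (List Int) (List (List Int))), d.keys.Nodup →
    (∀ side ∈ clues, ∀ clue ∈ side, clue ∉ dict1_keys_all.drop dict1_values.length) →
    clues.foldl (fun dict1 side =>
      side.foldl (fun dict1 clue =>
        if dict1.contains clue then dict1
        else (PySem.List.enumerate dict1_keys_all).foldl (fun dict1 p =>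
          if clue == p.2 then
            if dict1.contains clue then
              dict1.insert clue (dict1.getD clue [] ++ [PySem.List.pyGetD dict1_values p.1 []])
            else dict1.insert clue [PySem.List.pyGetD dict1_values p.1 []]
          else dict1) dict1) dict1) d =
    clues.foldl (fun d side =>
      side.foldl (fun d clue =>
        if !d.contains clue && ((dict1_keys_all.zip dict1_values).foldl (fun g p => g.modify p.1 [] (· ++ [p.2])) PySem.Dict.empty).contains clue then
          d.insert clue (((dict1_keys_all.zip dict1_values).foldl (fun g p => g.modify p.1 [] (· ++ [p.2])) PySem.Dict.empty).getD clue []) else d) d) d := by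
  intro clues
  induction clues with
  | nil => intro d _ _; rfl
  | cons side clues ih =>
    intro d hnd hpre
    rw [List.foldl_cons, List.foldl_cons]
    rw [pv_side_eq dict1_values dict1_keys_all side d hnd (hpre side List.mem_cons_self)]
    exact ih _ (pv_sideB_nodup dict1_values dict1_keys_all side d hnd)
      (fun s hs => hpre s (List.mem_cons_of_mem _ hs))

-- ===== VERDICT (by name: the statement is the Claim_ definition above) =====
theorem dict1_key_spec : Claim_equal_dict1_key := by
  intro clues dict1_values dict1_keys_all _ hpre
  unfold Spec_dict1_key
  simp only [dict1_key, dict1_key_alt]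
  rw [pv_clues_eq dict1_values dict1_keys_all clues PySem.Dict.empty
        (by rw [PySem.Dict.keys_empty]; exact List.nodup_nil) hpre]
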